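-- pv_equiv track=rewrite | github.com/Dannycjz/112_tp | socket_files/chess.py | Rdiag
-- ===== SOURCE A (Python) =====
-- def Rdiag(currR, currC):
--     result=[]
--     row=currR+1
--     col=currC-1
--     while row<8 and col>=0:
--         result.append((row, col))
--         row+=1
--         col-=1
--     index=len(result)
--     result.reverse()
--     result.append((currR, currC))
--     row=currR-1
--     col=currC+1
--     while row>=0 and col<8:
--         result.append((row, col))
--         row-=1
--         col+=1
--     return result, index
-- ===== SOURCE B (Python) =====
-- def Rdiag(currR, currC):
--     # closed-form extents along the anti-diagonal r + c = currR + currC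
--     n1 = max(0, min(7 - currR, currC))        # down-left extent
--     n2 = max(0, min(currR, 7 - currC))        # up-right extent
--     return [(currR + n1 - k, currC - n1 + k) for k in range(n1 + n2 + 1)], n1
-- ===== Notes on version B (the rewrite author's own statement) =====
-- stated objective: simpler
-- what changed: Replaces A's two directional while-loops plus reverse and pivot append by closed-form anti-diagonal extents n1/n2 and a single comprehension over one range.
import Mathlib
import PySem

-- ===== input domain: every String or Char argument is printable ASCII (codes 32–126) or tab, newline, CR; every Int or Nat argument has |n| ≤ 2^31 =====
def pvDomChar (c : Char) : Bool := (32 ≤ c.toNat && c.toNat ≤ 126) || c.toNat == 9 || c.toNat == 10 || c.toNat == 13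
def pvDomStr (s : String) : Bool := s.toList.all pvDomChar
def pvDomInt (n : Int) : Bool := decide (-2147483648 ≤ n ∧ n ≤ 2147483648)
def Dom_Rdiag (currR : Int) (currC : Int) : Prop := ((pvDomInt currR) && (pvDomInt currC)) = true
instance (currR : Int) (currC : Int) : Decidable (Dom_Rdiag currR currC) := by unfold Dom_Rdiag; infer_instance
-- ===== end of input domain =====

-- B replaces A's two directional while-loops, reverse and pivot append by closed-form
-- diagonal extents and one linear sweep (objective: simpler; same results on all inputs).

-- ===== PORT A =====
-- first while loop: while row<8 and col>=0: append (row,col); row+=1; col-=1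
def RdiagLoop1 (row col : Int) (result : List (Int × Int)) : List (Int × Int) :=
  if row < 8 ∧ 0 ≤ col then RdiagLoop1 (row + 1) (col - 1) (result ++ [(row, col)])
  else result
termination_by (8 - row).toNat
decreasing_by omega

-- second while loop: while row>=0 and col<8: append (row,col); row-=1; col+=1
def RdiagLoop2 (row col : Int) (result : List (Int × Int)) : List (Int × Int) :=
  if 0 ≤ row ∧ col < 8 then RdiagLoop2 (row - 1) (col + 1) (result ++ [(row, col)])
  else result
termination_by (row + 1).toNat
decreasing_by omega

def Rdiag (currR : Int) (currC : Int) : (List (Int × Int)) × Int :=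
  let result := RdiagLoop1 (currR + 1) (currC - 1) []
  let index : Int := (result.length : Int)
  let result := result.reverse ++ [(currR, currC)]
  let result := RdiagLoop2 (currR - 1) (currC + 1) result
  (result, index)

-- ===== PORT B =====
def Rdiag_alt (currR : Int) (currC : Int) : (List (Int × Int)) × Int :=
  let n1 := max 0 (min (7 - currR) currC)
  let n2 := max 0 (min currR (7 - currC))
  ((PySem.List.pyRange 0 (n1 + n2 + 1) 1).map
      (fun k => (currR + n1 - k, currC - n1 + k)), n1)

-- ===== PRECONDITION & SPEC =====
def Spec_Rdiag (currR : Int) (currC : Int) (out : (List (Int × Int)) × Int) : Prop := out = Rdiag_alt currR currC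
instance (currR : Int) (currC : Int) (out : (List (Int × Int)) × Int) : Decidable (Spec_Rdiag currR currC out) := by unfold Spec_Rdiag; infer_instance

-- ===== CLAIM (what is proved, stated in full; the proofs are below) =====
def Claim_equal_Rdiag : Prop := ∀ (currR : Int) (currC : Int), Dom_Rdiag currR currC → Spec_Rdiag currR currC (Rdiag currR currC)

-- ===== LEMMAS AND PROOFS =====

lemma loop1_eq (row col : Int) (acc : List (Int × Int)) :
    RdiagLoop1 row col acc
      = acc ++ List.map (fun k : Nat => ((row + (k : Int), col - (k : Int)) : Int × Int))
          (List.range (min (8 - row) (col + 1)).toNat) := by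
  fun_induction RdiagLoop1 row col acc with
  | case1 row col acc h ih =>
      have hm : (min (8 - row) (col + 1)).toNat
          = (min (8 - (row + 1)) ((col - 1) + 1)).toNat + 1 := by omega
      rw [ih, hm, List.range_succ_eq_map, List.map_cons, List.map_map, List.append_assoc,
          List.singleton_append]
      congr 1
      congr 1
      · norm_num
      · apply List.map_congr_left
        intro a _
        simp only [Function.comp_apply, Nat.cast_succ, Prod.mk.injEq]
        exact ⟨by ring, by ring⟩
  | case2 row col acc h =>
      have : (min (8 - row) (col + 1)).toNat = 0 := by omega
      simp [this]

lemma loop2_eq (row col : Int) (acc : List (Int × Int)) :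
    RdiagLoop2 row col acc
      = acc ++ List.map (fun k : Nat => ((row - (k : Int), col + (k : Int)) : Int × Int))
          (List.range (min (row + 1) (8 - col)).toNat) := by
  fun_induction RdiagLoop2 row col acc with
  | case1 row col acc h ih =>
      have hm : (min (row + 1) (8 - col)).toNat
          = (min ((row - 1) + 1) (8 - (col + 1))).toNat + 1 := by omega
      rw [ih, hm, List.range_succ_eq_map, List.map_cons, List.map_map, List.append_assoc,
          List.singleton_append]
      congr 1
      congr 1
      · norm_num
      · apply List.map_congr_left
        intro a _
        simp only [Function.comp_apply, Nat.cast_succ, Prod.mk.injEq]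
        exact ⟨by ring, by ring⟩
  | case2 row col acc h =>
      have : (min (row + 1) (8 - col)).toNat = 0 := by omega
      simp [this]

lemma reverse_map_range {α : Type} (n : Nat) (f : Nat → α) :
    ((List.range n).map f).reverse = (List.range n).map (fun i => f (n - 1 - i)) := by
  apply List.ext_getElem
  · simp
  · intro i h1 h2
    simp only [List.length_map, List.length_range] at h1 h2
    simp only [List.getElem_reverse, List.getElem_map, List.getElem_range,
      List.length_map, List.length_range]

-- ===== VERDICT (by name: the statement is the Claim_ definition above) =====
theorem Rdiag_spec : Claim_equal_Rdiag := by
  intro currR currC _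
  show Rdiag currR currC = Rdiag_alt currR currC
  unfold Rdiag Rdiag_alt
  simp only [loop1_eq, loop2_eq, List.nil_append]
  set n1 : Int := max 0 (min (7 - currR) currC) with hn1
  set n2 : Int := max 0 (min currR (7 - currC)) with hn2
  have e1 : (min (8 - (currR + 1)) ((currC - 1) + 1)).toNat = n1.toNat := by omega
  have e2 : (min ((currR - 1) + 1) (8 - (currC + 1))).toNat = n2.toNat := by omega
  have eN : (n1 + n2 + 1 - 0).toNat = n1.toNat + (n2.toNat + 1) := by omega
  rw [e1, e2, PySem.List.pyRange_one, eN, List.range_add, List.map_append, List.map_append,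
      List.range_succ_eq_map, List.map_cons, List.map_cons, List.map_map, List.map_map]
  simp only [zero_add, Nat.add_zero, Prod.mk.injEq, List.length_map,
    List.length_range, List.append_assoc]
  refine ⟨?_, by omega⟩
  rw [reverse_map_range]
  congr 1
  · apply List.map_congr_left
    intro a ha
    have ha' : a < n1.toNat := List.mem_range.mp ha
    show ((currR + 1 + ((n1.toNat - 1 - a : Nat) : Int),
           currC - 1 - ((n1.toNat - 1 - a : Nat) : Int)) : Int × Int)
        = (currR + n1 - (a : Int), currC - n1 + (a : Int))
    simp only [Prod.mk.injEq]
    constructor <;> omega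
  · rw [List.singleton_append]
    congr 1
    · simp only [Prod.mk.injEq]
      constructor <;> omega
    · rw [List.map_map, List.map_map]
      apply List.map_congr_left
      intro a _
      simp only [Function.comp_apply, Prod.mk.injEq]
      constructor <;> omega
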